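-- pv_equiv track=rewrite | github.com/Lightning-AI/pytorch-lightning | src/lightning/data/streaming/dataset.py | _replay_sampling
-- ===== SOURCE A (Python) =====
-- from typing import Any, Dict, List, Optional, Tuple, Union
--
-- def _replay_sampling(num_samples_yielded: int, batch_size: int, num_workers: int) -> Dict[int, int]:
--     """This function replays the sampling from the dataloader."""
--     divisible_num_batches_yielded = num_samples_yielded // (num_workers * batch_size)
--
--     indexes = {}
--     for worker_idx in range(num_workers):
--         indexes[worker_idx] = divisible_num_batches_yielded * batch_size
--
--     num_samples_yielded = num_samples_yielded - (num_workers * divisible_num_batches_yielded * batch_size)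
--
--     # take care of the reminder
--     worker_idx = 0  # reset the worker_idx
--     while True:
--         if num_samples_yielded >= batch_size:
--             indexes[worker_idx] += batch_size
--             worker_idx = (worker_idx + 1) % num_workers
--             num_samples_yielded -= batch_size
--         else:
--             indexes[worker_idx] += num_samples_yielded
--             break
--     return indexes
-- ===== SOURCE B (Python) =====
-- def _replay_sampling(num_samples_yielded: int, batch_size: int, num_workers: int) -> dict:
--     """Replay the dataloader sampling positions with direct arithmetic instead of a round-robin loop."""
--     divisible_num_batches_yielded = num_samples_yielded // (num_workers * batch_size)
--     base = divisible_num_batches_yielded * batch_size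
--     remainder = num_samples_yielded - num_workers * base
--     full, leftover = divmod(remainder, batch_size)
--     return {
--         worker_idx: base + (batch_size if worker_idx < full else leftover if worker_idx == full else 0)
--         for worker_idx in range(num_workers)
--     }
-- ===== Notes on version B (the rewrite author's own statement) =====
-- stated objective: simpler
-- what changed: Replaces A's round-robin while-loop that hands out the remainder batch by batch with direct arithmetic: divmod(remainder, batch_size) tells which workers get a full extra batch and which gets the leftover, so each worker's index is a closed-form expression.
-- outside the precondition, e.g. on _replay_sampling(1, -2, 2): A returns {0: -1, 1: 2}, B returns {0: 0, 1: 1}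
import Mathlib
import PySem

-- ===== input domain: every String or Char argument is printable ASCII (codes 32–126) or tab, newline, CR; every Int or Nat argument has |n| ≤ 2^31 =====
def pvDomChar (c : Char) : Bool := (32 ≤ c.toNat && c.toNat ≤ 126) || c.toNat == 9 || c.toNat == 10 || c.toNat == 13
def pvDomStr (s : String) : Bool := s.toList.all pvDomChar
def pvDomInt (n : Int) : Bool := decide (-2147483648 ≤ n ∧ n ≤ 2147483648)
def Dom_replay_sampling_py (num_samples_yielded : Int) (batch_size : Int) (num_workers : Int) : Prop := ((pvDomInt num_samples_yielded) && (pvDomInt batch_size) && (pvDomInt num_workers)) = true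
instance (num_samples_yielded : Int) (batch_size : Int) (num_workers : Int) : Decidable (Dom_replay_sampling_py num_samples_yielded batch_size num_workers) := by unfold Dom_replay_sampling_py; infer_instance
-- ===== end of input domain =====

-- B replaces A's round-robin remainder-distribution while-loop with direct divmod arithmetic (objective: simpler).

-- ===== PORT A =====
-- the 'while True' remainder loop of A; fuel only makes the recursion total (never exhausted under Pre_)
def replayLoopA (fuel : Nat) (bs nw : Int) (idx : PySem.Dict Int Int) (wi rem : Int) : PySem.Dict Int Int :=
  match fuel with
  | 0 => idx
  | f + 1 =>
    if bs ≤ rem then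
      replayLoopA f bs nw (idx.modify wi 0 (· + bs)) (PySem.Int.mod (wi + 1) nw) (rem - bs)
    else
      idx.modify wi 0 (· + rem)

def replay_sampling_py (num_samples_yielded : Int) (batch_size : Int) (num_workers : Int) : List (Int × Int) :=
  let divisible := PySem.Int.floordiv num_samples_yielded (num_workers * batch_size)
  let indexes := (PySem.List.pyRange 0 num_workers 1).foldl
      (fun d i => d.insert i (divisible * batch_size)) PySem.Dict.empty
  let rem := num_samples_yielded - num_workers * divisible * batch_size
  (replayLoopA (rem.toNat + 1) batch_size num_workers indexes 0 rem).items

-- ===== PORT B =====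
def replay_sampling_py_alt (num_samples_yielded : Int) (batch_size : Int) (num_workers : Int) : List (Int × Int) :=
  let divisible := PySem.Int.floordiv num_samples_yielded (num_workers * batch_size)
  let base := divisible * batch_size
  let rem := num_samples_yielded - num_workers * base
  let full := PySem.Int.floordiv rem batch_size
  let leftover := PySem.Int.mod rem batch_size
  (PySem.List.pyRange 0 num_workers 1).map (fun i =>
    (i, base + (if i < full then batch_size else if i = full then leftover else 0)))

-- ===== PRECONDITION & SPEC =====
-- Pre_ excludes non-positive batch_size or num_workers — outside the function's natural domain of positive
-- counts: there A raises ZeroDivisionError (batch_size = 0 or num_workers = 0) or KeyError (num_workers < 0)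
-- or loops forever, except that for negative batch_size the while-loop can exit early with leftover loop state.
def Pre_replay_sampling_py (num_samples_yielded : Int) (batch_size : Int) (num_workers : Int) : Prop :=
  1 ≤ batch_size ∧ 1 ≤ num_workers
instance (num_samples_yielded : Int) (batch_size : Int) (num_workers : Int) : Decidable (Pre_replay_sampling_py num_samples_yielded batch_size num_workers) := by unfold Pre_replay_sampling_py; infer_instance

def pvWitness_replay_sampling_py : Int × Int × Int := (7, 2, 3)

def Spec_replay_sampling_py (num_samples_yielded : Int) (batch_size : Int) (num_workers : Int) (out : List (Int × Int)) : Prop := out = replay_sampling_py_alt num_samples_yielded batch_size num_workers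
instance (num_samples_yielded : Int) (batch_size : Int) (num_workers : Int) (out : List (Int × Int)) : Decidable (Spec_replay_sampling_py num_samples_yielded batch_size num_workers out) := by unfold Spec_replay_sampling_py; infer_instance

-- ===== CLAIM (what is proved, stated in full; the proofs are below) =====
def Claim_equal_replay_sampling_py : Prop := ∀ (num_samples_yielded : Int) (batch_size : Int) (num_workers : Int), Dom_replay_sampling_py num_samples_yielded batch_size num_workers → Pre_replay_sampling_py num_samples_yielded batch_size num_workers → Spec_replay_sampling_py num_samples_yielded batch_size num_workers (replay_sampling_py num_samples_yielded batch_size num_workers)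


-- ===== LEMMAS AND PROOFS =====

-- one remainder-loop step of A acts on keys and values as a closed-form increment
theorem replayLoopA_spec (bs nw : Int) (hbs : 1 ≤ bs) :
    ∀ (f : Nat) (rem wi : Int) (d : PySem.Dict Int Int),
      d.keys = PySem.List.pyRange 0 nw 1 →
      0 ≤ rem → rem.toNat < f → 0 ≤ wi →
      wi + PySem.Int.floordiv rem bs < nw →
      (replayLoopA f bs nw d wi rem).keys = d.keys ∧
      ∀ k, (replayLoopA f bs nw d wi rem).getD k 0 =
        d.getD k 0 + (if wi ≤ k ∧ k < wi + PySem.Int.floordiv rem bs then bs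
                      else if k = wi + PySem.Int.floordiv rem bs then PySem.Int.mod rem bs else 0) := by
  intro f
  induction f with
  | zero => intro rem wi d _ _ h _ _; exact absurd h (by omega)
  | succ f ih =>
    intro rem wi d hkeys hrem hf hwi hlt
    have hbspos : (0:Int) < bs := by omega
    have hdec := PySem.Int.floordiv_mul_add_mod rem bs
    have hm0 := PySem.Int.mod_nonneg rem hbspos
    have hmlt := PySem.Int.mod_lt rem hbspos
    have hfd0 : 0 ≤ PySem.Int.floordiv rem bs := by
      rw [PySem.Int.le_floordiv_iff_mul_le hbspos]; nlinarith
    have hconwi : d.contains wi = true := by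
      rw [PySem.Dict.contains_iff_mem_keys, hkeys, PySem.List.mem_pyRange_one]; omega
    by_cases hge : bs ≤ rem
    · -- add branch: full ≥ 1, no wraparound
      have hfull1 : 1 ≤ PySem.Int.floordiv rem bs := by
        rw [PySem.Int.le_floordiv_iff_mul_le hbspos]; nlinarith
      have hnw : (0:Int) < nw := by omega
      have hmodwi : PySem.Int.mod (wi + 1) nw = wi + 1 := by
        rw [PySem.Int.mod_eq_emod_of_pos hnw]
        exact Int.emod_eq_of_lt (by omega) (by omega)
      have hfd' : PySem.Int.floordiv (rem - bs) bs = PySem.Int.floordiv rem bs - 1 := by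
        rw [PySem.Int.floordiv_eq_iff_of_pos hbspos]
        constructor <;> nlinarith
      have hmod' : PySem.Int.mod (rem - bs) bs = PySem.Int.mod rem bs := by
        have h2 := PySem.Int.floordiv_mul_add_mod (rem - bs) bs
        rw [hfd'] at h2
        linear_combination h2 - hdec
      have hkeys' : (d.modify wi 0 (· + bs)).keys = PySem.List.pyRange 0 nw 1 := by
        rw [PySem.Dict.keys_modify, PySem.Dict.keys_insert_of_contains _ _ hconwi, hkeys]
      have hih := ih (rem - bs) (wi + 1) (d.modify wi 0 (· + bs)) hkeys'
        (by omega) (by omega) (by omega) (by rw [hfd']; omega)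
      refine ⟨?_, ?_⟩
      · simp only [replayLoopA, if_pos hge, hmodwi]
        rw [hih.1, PySem.Dict.keys_modify, PySem.Dict.keys_insert_of_contains _ _ hconwi]
      · intro k
        simp only [replayLoopA, if_pos hge, hmodwi]
        rw [hih.2 k, PySem.Dict.getD_modify, hfd', hmod']
        by_cases hk : k = wi
        · rw [hk, if_pos rfl]
          split_ifs <;> omega
        · rw [if_neg hk]
          split_ifs <;> omega
    · -- exit branch: remainder added to the current worker
      have hfd0' : PySem.Int.floordiv rem bs = 0 := by
        rw [PySem.Int.floordiv_eq_iff_of_pos hbspos]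
        constructor <;> nlinarith
      have hmod0 : PySem.Int.mod rem bs = rem := by nlinarith [hdec, hfd0']
      refine ⟨?_, ?_⟩
      · simp only [replayLoopA, if_neg hge]
        rw [PySem.Dict.keys_modify, PySem.Dict.keys_insert_of_contains _ _ hconwi]
      · intro k
        simp only [replayLoopA, if_neg hge]
        rw [PySem.Dict.getD_modify, hfd0', hmod0]
        by_cases hk : k = wi
        · rw [hk, if_pos rfl]
          split_ifs <;> omega
        · rw [if_neg hk]
          split_ifs <;> omega

-- A's whole computation for any per-worker base and any remainder 0 ≤ rem < nw * bs
theorem replay_main (bs nw : Int) (hbs : 1 ≤ bs) (hnw : 1 ≤ nw) (base rem : Int)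
    (hrem0 : 0 ≤ rem) (hremlt : rem < nw * bs) :
    (replayLoopA (rem.toNat + 1) bs nw
        ((PySem.List.pyRange 0 nw 1).foldl (fun d i => d.insert i base) PySem.Dict.empty) 0 rem).items
    = (PySem.List.pyRange 0 nw 1).map (fun i =>
        (i, base + (if i < PySem.Int.floordiv rem bs then bs
                    else if i = PySem.Int.floordiv rem bs then PySem.Int.mod rem bs else 0))) := by
  have hbspos : (0:Int) < bs := by omega
  have hfull : PySem.Int.floordiv rem bs < nw := by
    rw [PySem.Int.floordiv_lt_iff_lt_mul hbspos]; nlinarith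
  have hfd0 : 0 ≤ PySem.Int.floordiv rem bs := by
    rw [PySem.Int.le_floordiv_iff_mul_le hbspos]; nlinarith
  have hm0 := PySem.Int.mod_nonneg rem hbspos
  set d0 := (PySem.List.pyRange 0 nw 1).foldl (fun d i => d.insert i base) PySem.Dict.empty with hd0
  have hitems0 : d0.items = (PySem.List.pyRange 0 nw 1).map (fun i => (i, base)) := by
    have h := PySem.Dict.items_foldl_insert_fresh (PySem.List.pyRange 0 nw 1)
      (fun a => a) (fun _ => base) PySem.Dict.empty
      (by intro a _; exact PySem.Dict.contains_empty a)
      (by simpa using PySem.List.nodup_pyRange_one 0 nw)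
    simpa using h
  have hkeys0 : d0.keys = PySem.List.pyRange 0 nw 1 := by
    show d0.items.map (·.1) = _
    rw [hitems0, List.map_map]
    exact List.map_id _
  have hloop := replayLoopA_spec bs nw hbs (rem.toNat + 1) rem 0 d0 hkeys0
    hrem0 (by omega) le_rfl (by simpa using hfull)
  have hkeysF : (replayLoopA (rem.toNat + 1) bs nw d0 0 rem).keys = PySem.List.pyRange 0 nw 1 := by
    rw [hloop.1, hkeys0]
  have hnodupF : (replayLoopA (rem.toNat + 1) bs nw d0 0 rem).keys.Nodup := by
    rw [hkeysF]; exact PySem.List.nodup_pyRange_one 0 nw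
  have hgetd0 : ∀ k ∈ PySem.List.pyRange 0 nw 1, d0.getD k 0 = base := by
    intro k hk
    have hmem : (k, base) ∈ d0.items := by
      rw [hitems0]; exact List.mem_map.mpr ⟨k, hk, rfl⟩
    exact PySem.Dict.getD_of_mem_items d0 hmem
      (by rw [hkeys0]; exact PySem.List.nodup_pyRange_one 0 nw) 0
  rw [PySem.Dict.items_eq_map_keys _ hnodupF 0, hkeysF]
  apply List.map_congr_left
  intro i hi
  have hib := PySem.List.mem_pyRange_one.mp hi
  rw [hloop.2 i, hgetd0 i hi]
  have hmlt := PySem.Int.mod_lt rem hbspos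
  obtain ⟨hi0, hinw⟩ := hib
  simp only [Prod.mk.injEq, zero_add, true_and]
  generalize hF : PySem.Int.floordiv rem bs = F at hfull hfd0 ⊢
  generalize hM2 : PySem.Int.mod rem bs = M at hm0 hmlt ⊢
  split_ifs <;> omega

theorem replay_sampling_eq (n bs nw : Int) (hbs : 1 ≤ bs) (hnw : 1 ≤ nw) :
    replay_sampling_py n bs nw = replay_sampling_py_alt n bs nw := by
  have hbspos : (0:Int) < bs := by omega
  have hM : (0:Int) < nw * bs := by positivity
  have hdec := PySem.Int.floordiv_mul_add_mod n (nw * bs)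
  unfold replay_sampling_py replay_sampling_py_alt
  show (replayLoopA ((n - nw * PySem.Int.floordiv n (nw * bs) * bs).toNat + 1) bs nw
      ((PySem.List.pyRange 0 nw 1).foldl
        (fun d i => d.insert i (PySem.Int.floordiv n (nw * bs) * bs)) PySem.Dict.empty) 0
      (n - nw * PySem.Int.floordiv n (nw * bs) * bs)).items
    = (PySem.List.pyRange 0 nw 1).map (fun i =>
        (i, PySem.Int.floordiv n (nw * bs) * bs +
          (if i < PySem.Int.floordiv (n - nw * (PySem.Int.floordiv n (nw * bs) * bs)) bs then bs
           else if i = PySem.Int.floordiv (n - nw * (PySem.Int.floordiv n (nw * bs) * bs)) bs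
           then PySem.Int.mod (n - nw * (PySem.Int.floordiv n (nw * bs) * bs)) bs else 0)))
  have hassoc : n - nw * (PySem.Int.floordiv n (nw * bs) * bs)
      = n - nw * PySem.Int.floordiv n (nw * bs) * bs := by ring
  rw [hassoc]
  have hmodeq : n - nw * PySem.Int.floordiv n (nw * bs) * bs = PySem.Int.mod n (nw * bs) := by
    linear_combination -hdec
  have hrem0 : 0 ≤ n - nw * PySem.Int.floordiv n (nw * bs) * bs := by
    rw [hmodeq]; exact PySem.Int.mod_nonneg n hM
  have hremlt : n - nw * PySem.Int.floordiv n (nw * bs) * bs < nw * bs := by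
    rw [hmodeq]; exact PySem.Int.mod_lt n hM
  exact replay_main bs nw hbs hnw _ _ hrem0 hremlt

-- ===== VERDICT (by name: the statement is the Claim_ definition above) =====
theorem replay_sampling_py_spec : Claim_equal_replay_sampling_py := by
  intro n bs nw _ hpre
  unfold Spec_replay_sampling_py
  exact replay_sampling_eq n bs nw hpre.1 hpre.2
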